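-- pv_equiv track=rewrite | github.com/resoltico/FTLLexBuffer | src/ftllexbuffer/parsing/dates.py | _tokenize_babel_pattern
-- ===== SOURCE A (Python) =====
-- def _tokenize_babel_pattern(pattern: str) -> list[str]:
--     """Tokenize Babel CLDR pattern into individual tokens.
--
--     v0.8.0: Token-based approach replaces regex word boundary approach.
--     This correctly handles patterns like "d.MM.yyyy" where "d" is adjacent
--     to punctuation without word boundaries.
--
--     Args:
--         pattern: Babel CLDR date pattern (e.g., "d.MM.yyyy")
--
--     Returns:
--         List of tokens (e.g., ["d", ".", "MM", ".", "yyyy"])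
--     """
--     tokens: list[str] = []
--     i = 0
--     n = len(pattern)
--
--     while i < n:
--         char = pattern[i]
--
--         # Check for quoted literal (single quotes in CLDR patterns)
--         if char == "'":
--             # Find closing quote
--             j = i + 1
--             while j < n and pattern[j] != "'":
--                 j += 1
--             # Include content between quotes as literal
--             if j > i + 1:
--                 tokens.append(pattern[i + 1 : j])
--             i = j + 1
--             continue
--
--         # Check for pattern letter sequences (a-zA-Z)
--         if char.isalpha():
--             # Collect consecutive same letters (e.g., "yyyy", "MM", "dd")
--             j = i + 1
--             while j < n and pattern[j] == char:
--                 j += 1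
--             tokens.append(pattern[i:j])
--             i = j
--             continue
--
--         # Everything else is a literal (punctuation, spaces, etc.)
--         tokens.append(char)
--         i += 1
--
--     return tokens
-- ===== SOURCE B (Python) =====
-- def _tokenize_babel_pattern(pattern: str) -> list[str]:
--     """One-pass state-machine tokenizer: fold over characters with a
--     (tokens, in_quote, buffer) state instead of index arithmetic with
--     inner scanning loops."""
--     tokens: list[str] = []
--     in_quote = False
--     buf = ""
--     for ch in pattern:
--         if in_quote:
--             if ch == "'":
--                 if buf:
--                     tokens.append(buf)
--                 buf = ""
--                 in_quote = False
--             else: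
--                 buf += ch
--         elif ch == "'":
--             if buf:
--                 tokens.append(buf)
--             buf = ""
--             in_quote = True
--         elif ch.isalpha():
--             if buf and buf[0] == ch:
--                 buf += ch
--             else:
--                 if buf:
--                     tokens.append(buf)
--                 buf = ch
--         else:
--             if buf:
--                 tokens.append(buf)
--             buf = ""
--             tokens.append(ch)
--     if buf:
--         tokens.append(buf)
--     return tokens
-- ===== Notes on version B (the rewrite author's own statement) =====
-- stated objective: alternative
-- what changed: Replaces A's index-based while loop with inner scanning loops (find the closing quote / end of a letter run) and slicing by a single left-to-right fold over the characters with a (tokens, in_quote, buffer) state machine.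
import Mathlib
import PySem

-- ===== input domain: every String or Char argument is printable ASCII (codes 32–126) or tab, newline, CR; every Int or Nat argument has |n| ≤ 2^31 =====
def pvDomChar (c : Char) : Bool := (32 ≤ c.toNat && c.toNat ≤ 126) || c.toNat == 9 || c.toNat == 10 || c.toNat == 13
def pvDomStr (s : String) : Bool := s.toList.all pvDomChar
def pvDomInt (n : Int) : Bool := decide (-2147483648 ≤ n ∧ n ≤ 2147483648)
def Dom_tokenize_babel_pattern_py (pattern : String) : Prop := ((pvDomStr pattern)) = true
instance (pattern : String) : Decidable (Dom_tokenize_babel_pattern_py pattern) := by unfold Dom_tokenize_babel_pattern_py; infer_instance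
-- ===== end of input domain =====

-- B replaces A's index-based while loop (with inner closing-quote / letter-run scans and
-- slicing) by a single fold over the characters with a (tokens, in_quote, buffer) state
-- machine; same cost, different structure (objective: alternative).

-- ===== PORT A =====
-- the while loops are transcribed with a structural fuel counter (fuel ≥ remaining indices,
-- so the guard `j < n` always stops the loop before the fuel runs out)

-- inner `while j < n and pattern[j] != "'"` scan
def pvFindQuoteF (s : List Char) (n : Nat) : Nat → Nat → Nat
  | 0, j => j
  | fuel + 1, j => if j < n ∧ s.getD j ' ' ≠ '\'' then pvFindQuoteF s n fuel (j + 1) else j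

def pvFindQuote (s : List Char) (n j : Nat) : Nat := pvFindQuoteF s n (n - j) j

-- inner `while j < n and pattern[j] == char` scan
def pvRunEndF (s : List Char) (n : Nat) (c : Char) : Nat → Nat → Nat
  | 0, j => j
  | fuel + 1, j => if j < n ∧ s.getD j ' ' = c then pvRunEndF s n c fuel (j + 1) else j

def pvRunEnd (s : List Char) (n : Nat) (c : Char) (j : Nat) : Nat := pvRunEndF s n c (n - j) j

-- main `while i < n` loop (i advances by at least one per iteration, so fuel n - i suffices);
-- slices pattern[a:b] with 0 ≤ a ≤ b ≤ n are exactly (drop a).take (b-a)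
def pvLoopAF (s : List Char) (n : Nat) : Nat → Nat → List String → List String
  | 0, _, tokens => tokens
  | fuel + 1, i, tokens =>
    if i < n then
      if s.getD i ' ' = '\'' then
        pvLoopAF s n fuel (pvFindQuote s n (i + 1) + 1)
          (if i + 1 < pvFindQuote s n (i + 1) then
              tokens ++ [String.ofList ((s.drop (i + 1)).take (pvFindQuote s n (i + 1) - (i + 1)))]
            else tokens)
      else if PySem.Chars.isalpha (s.getD i ' ') then
        pvLoopAF s n fuel (pvRunEnd s n (s.getD i ' ') (i + 1))
          (tokens ++ [String.ofList ((s.drop i).take (pvRunEnd s n (s.getD i ' ') (i + 1) - i))])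
      else
        pvLoopAF s n fuel (i + 1) (tokens ++ [String.ofList [s.getD i ' ']])
    else tokens

def tokenize_babel_pattern_py (pattern : String) : List String :=
  pvLoopAF pattern.toList pattern.toList.length pattern.toList.length 0 []

-- ===== PORT B =====
-- one step of the fold: state = (tokens, in_quote, buffer)
def pvStepB (st : List String × Bool × List Char) (ch : Char) : List String × Bool × List Char :=
  match st with
  | (tokens, inQuote, buf) =>
    if inQuote then
      if ch = '\'' then ((if buf = [] then tokens else tokens ++ [String.ofList buf]), false, [])
      else (tokens, true, buf ++ [ch])
    else if ch = '\'' then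
      ((if buf = [] then tokens else tokens ++ [String.ofList buf]), true, [])
    else if PySem.Chars.isalpha ch then
      (if buf ≠ [] ∧ buf.headD ' ' = ch then (tokens, false, buf ++ [ch])
       else ((if buf = [] then tokens else tokens ++ [String.ofList buf]), false, [ch]))
    else
      ((if buf = [] then tokens else tokens ++ [String.ofList buf]) ++ [String.ofList [ch]], false, [])

-- the trailing `if buf: tokens.append(buf)` flush
def pvFinish (st : List String × Bool × List Char) : List String :=
  match st with
  | (tokens, _, buf) => if buf = [] then tokens else tokens ++ [String.ofList buf]

def tokenize_babel_pattern_py_alt (pattern : String) : List String :=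
  pvFinish (pattern.toList.foldl pvStepB ([], false, []))

-- ===== PRECONDITION & SPEC =====
def Spec_tokenize_babel_pattern_py (pattern : String) (out : List String) : Prop := out = tokenize_babel_pattern_py_alt pattern
instance (pattern : String) (out : List String) : Decidable (Spec_tokenize_babel_pattern_py pattern out) := by unfold Spec_tokenize_babel_pattern_py; infer_instance

-- ===== CLAIM (what is proved, stated in full; the proofs are below) =====
def Claim_equal_tokenize_babel_pattern_py : Prop := ∀ (pattern : String), Dom_tokenize_babel_pattern_py pattern → Spec_tokenize_babel_pattern_py pattern (tokenize_babel_pattern_py pattern)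

-- ===== LEMMAS AND PROOFS =====

theorem pvFindQuoteF_eq (s : List Char) (fuel : Nat) : ∀ j : Nat, s.length ≤ j + fuel →
    pvFindQuoteF s s.length fuel j = j + ((s.drop j).takeWhile (fun c => c ≠ '\'')).length := by
  induction fuel with
  | zero =>
    intro j hj
    rw [List.drop_eq_nil_of_le (by omega)]
    simp [pvFindQuoteF]
  | succ fuel ih =>
    intro j hj
    show (if j < s.length ∧ s.getD j ' ' ≠ '\'' then pvFindQuoteF s s.length fuel (j + 1) else j) = _
    split
    · rename_i h
      obtain ⟨hlt, hne⟩ := h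
      rw [ih (j + 1) (by omega)]
      rw [List.drop_eq_getElem_cons hlt, List.takeWhile_cons]
      rw [List.getD_eq_getElem s ' ' hlt] at hne
      simp [hne]
      omega
    · rename_i h
      rw [Decidable.not_and_iff_not_or_not] at h
      rcases h with h | h
      · rw [List.drop_eq_nil_of_le (by omega)]
        simp
      · have hlt : j < s.length ∨ s.length ≤ j := by omega
        rcases hlt with hlt | hlt
        · rw [List.drop_eq_getElem_cons hlt, List.takeWhile_cons]
          rw [List.getD_eq_getElem s ' ' hlt] at h
          simp at h
          simp [h]
        · rw [List.drop_eq_nil_of_le hlt]; simp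

theorem pvFindQuote_eq (s : List Char) (j : Nat) :
    pvFindQuote s s.length j = j + ((s.drop j).takeWhile (fun c => c ≠ '\'')).length :=
  pvFindQuoteF_eq s (s.length - j) j (by omega)

theorem pvRunEndF_eq (s : List Char) (c : Char) (fuel : Nat) : ∀ j : Nat, s.length ≤ j + fuel →
    pvRunEndF s s.length c fuel j = j + ((s.drop j).takeWhile (fun x => x = c)).length := by
  induction fuel with
  | zero =>
    intro j hj
    rw [List.drop_eq_nil_of_le (by omega)]
    simp [pvRunEndF]
  | succ fuel ih =>
    intro j hj
    show (if j < s.length ∧ s.getD j ' ' = c then pvRunEndF s s.length c fuel (j + 1) else j) = _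
    split
    · rename_i h
      obtain ⟨hlt, heq⟩ := h
      rw [ih (j + 1) (by omega)]
      rw [List.drop_eq_getElem_cons hlt, List.takeWhile_cons]
      rw [List.getD_eq_getElem s ' ' hlt] at heq
      simp [heq]
      omega
    · rename_i h
      rw [Decidable.not_and_iff_not_or_not] at h
      rcases h with h | h
      · rw [List.drop_eq_nil_of_le (by omega)]
        simp
      · have hlt : j < s.length ∨ s.length ≤ j := by omega
        rcases hlt with hlt | hlt
        · rw [List.drop_eq_getElem_cons hlt, List.takeWhile_cons]
          rw [List.getD_eq_getElem s ' ' hlt] at h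
          simp [h]
        · rw [List.drop_eq_nil_of_le hlt]; simp

theorem pvRunEnd_eq (s : List Char) (c : Char) (j : Nat) :
    pvRunEnd s s.length c j = j + ((s.drop j).takeWhile (fun x => x = c)).length :=
  pvRunEndF_eq s c (s.length - j) j (by omega)

-- folding in quote mode accumulates the buffer while no quote appears
theorem pvFoldB_quote (cs : List Char) (t : List String) (b : List Char)
    (h : ∀ c ∈ cs, c ≠ '\'') :
    cs.foldl pvStepB (t, true, b) = (t, true, b ++ cs) := by
  induction cs generalizing b with
  | nil => simp
  | cons c cs ih =>
    have hc : c ≠ '\'' := h c (List.mem_cons_self ..)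
    have hstep : pvStepB (t, true, b) c = (t, true, b ++ [c]) := by simp [pvStepB, hc]
    rw [List.foldl_cons, hstep, ih (b ++ [c]) (fun x hx => h x (List.mem_cons_of_mem _ hx))]
    simp

-- folding a run of the same alphabetic letter extends the buffer
theorem pvFoldB_run (cs : List Char) (t : List String) (b : List Char) (c : Char)
    (halpha : PySem.Chars.isalpha c = true) (hb : b ≠ []) (hh : b.head?.getD ' ' = c)
    (h : ∀ x ∈ cs, x = c) :
    cs.foldl pvStepB (t, false, b) = (t, false, b ++ cs) := by
  induction cs generalizing b with
  | nil => simp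
  | cons x cs ih =>
    have hx : x = c := h x (List.mem_cons_self ..)
    subst hx
    have hq : x ≠ '\'' := by rintro rfl; exact absurd halpha (by decide)
    have hstep : pvStepB (t, false, b) x = (t, false, b ++ [x]) := by
      simp [pvStepB, hq, halpha, hb, hh]
    rw [List.foldl_cons, hstep,
      ih (b ++ [x]) (by simp) (by cases b <;> simp_all)
        (fun y hy => h y (List.mem_cons_of_mem _ hy))]
    simp

-- a pending buffer that cannot merge with what follows may be flushed eagerly
theorem pvFoldB_flush (cs : List Char) (t : List String) (b : List Char) (hb : b ≠ [])
    (h : cs = [] ∨ ¬(PySem.Chars.isalpha (cs.headD ' ') = true ∧ b.head?.getD ' ' = cs.headD ' ')) :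
    pvFinish (cs.foldl pvStepB (t, false, b)) =
      pvFinish (cs.foldl pvStepB (t ++ [String.ofList b], false, [])) := by
  rcases cs with _ | ⟨ch, rest⟩
  · simp [pvFinish, hb]
  · have hstep : pvStepB (t, false, b) ch = pvStepB (t ++ [String.ofList b], false, []) ch := by
      rcases h with h | h
      · exact absurd h (by simp)
      by_cases hq : ch = '\''
      · simp [pvStepB, hq, hb]
      · by_cases ha : PySem.Chars.isalpha ch = true
        · have hne : ¬ b.head?.getD ' ' = ch := by
            simp only [List.headD_cons] at h
            intro hcontra
            exact h ⟨ha, hcontra⟩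
          simp [pvStepB, hq, ha, hb, hne]
        · simp [pvStepB, hq, ha, hb]
    rw [List.foldl_cons, List.foldl_cons, hstep]

-- once the index has passed the end of the string the loop returns its accumulator
theorem pvLoopAF_stop (s : List Char) (n : Nat) (fuel : Nat) : ∀ i t, n ≤ i →
    pvLoopAF s n fuel i t = t := by
  induction fuel with
  | zero => intro i t _; rfl
  | succ fuel _ =>
    intro i t hi
    show (if i < n then _ else t) = t
    rw [if_neg (by omega)]

-- main loop invariant: A's loop from index i equals B's fold over the remaining characters
theorem pvLoopAF_eq_fold (s : List Char) (fuel : Nat) : ∀ (i : Nat) (t : List String),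
    s.length ≤ i + fuel →
    pvLoopAF s s.length fuel i t = pvFinish ((s.drop i).foldl pvStepB (t, false, [])) := by
  induction fuel with
  | zero =>
    intro i t hfuel
    rw [List.drop_eq_nil_of_le (by omega)]
    simp [pvLoopAF, pvFinish]
  | succ fuel ih =>
    intro i t hfuel
    show (if i < s.length then _ else t) = _
    split
    · rename_i hi
      have hdrop : s.drop i = s.getD i ' ' :: s.drop (i + 1) := by
        rw [List.getD_eq_getElem s ' ' hi]; exact List.drop_eq_getElem_cons hi
      generalize hc : s.getD i ' ' = c at hdrop ⊢
      by_cases hq : c = '\''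
      · -- quoted literal
        subst hq
        rw [if_pos rfl]
        have hwd : (s.drop (i + 1)).takeWhile (fun c => c ≠ '\'') ++
            (s.drop (i + 1)).dropWhile (fun c => c ≠ '\'') = s.drop (i + 1) :=
          List.takeWhile_append_dropWhile
        generalize hw : (s.drop (i + 1)).takeWhile (fun c => c ≠ '\'') = w at hwd
        generalize hd : (s.drop (i + 1)).dropWhile (fun c => c ≠ '\'') = d at hwd
        have hjq : pvFindQuote s s.length (i + 1) = i + 1 + w.length := by
          rw [pvFindQuote_eq s (i + 1), hw]
        have hsub : pvFindQuote s s.length (i + 1) - (i + 1) = w.length := by omega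
        have hdropj : s.drop (pvFindQuote s s.length (i + 1)) = d := by
          rw [hjq, ← List.drop_drop, ← hwd, List.drop_left]
        have hwq : ∀ x ∈ w, x ≠ '\'' := by
          intro x hx
          rw [← hw] at hx
          simpa using List.mem_takeWhile_imp hx
        have hlt : (i + 1 < pvFindQuote s s.length (i + 1)) ↔ w ≠ [] := by
          rw [hjq]
          constructor
          · intro h hcon; rw [hcon] at h; simp at h
          · intro h; have := List.length_pos_iff.mpr h; omega
        have hstep : pvStepB (t, false, []) '\'' = (t, true, []) := by simp [pvStepB]
        rw [hdrop, List.foldl_cons, hstep, ← hwd, List.foldl_append, pvFoldB_quote w t [] hwq,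
          List.nil_append, hsub, List.take_left]
        rcases hde : d with _ | ⟨ch, d'⟩
        · -- unterminated quote runs to the end of the pattern
          subst hde
          have hlen : (s.drop (i + 1)).length = w.length := by rw [← hwd]; simp
          have hend : s.length ≤ pvFindQuote s s.length (i + 1) := by
            rw [hjq]
            have := List.length_drop (l := s) (i := i + 1)
            omega
          rw [pvLoopAF_stop s s.length fuel _ _ (by omega)]
          simp only [List.foldl_nil, pvFinish]
          by_cases hwnil : w = []
          · rw [if_neg (by rw [hlt]; simp [hwnil]), if_pos hwnil]
          · rw [if_pos (hlt.mpr hwnil), if_neg hwnil]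
        · -- closing quote found
          have hch : ch = '\'' := by
            have heq : ((s.drop (i + 1)).dropWhile (fun c => c ≠ '\'')) = ch :: d' := by
              rw [hd, hde]
            have h2 : ((s.drop (i + 1)).dropWhile (fun c => c ≠ '\'')).head? = some ch := by
              rw [heq]; rfl
            have h3 := List.head?_dropWhile_not (fun c => decide (c ≠ '\'')) (s.drop (i + 1))
            rw [h2] at h3
            simpa using h3
          subst hch
          rw [List.foldl_cons]
          have hstep2 : pvStepB (t, true, w) '\'' =
              ((if i + 1 < pvFindQuote s s.length (i + 1) then t ++ [String.ofList w] else t),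
                false, []) := by
            by_cases hwnil : w = []
            · rw [if_neg (by rw [hlt]; simp [hwnil])]
              simp [pvStepB, hwnil]
            · rw [if_pos (hlt.mpr hwnil)]
              simp [pvStepB, hwnil]
          rw [hstep2]
          have hd' : s.drop (pvFindQuote s s.length (i + 1) + 1) = d' := by
            rw [← List.drop_drop, hdropj, hde, List.drop_one, List.tail_cons]
          have hfuel2 : s.length ≤ (pvFindQuote s s.length (i + 1) + 1) + fuel := by
            rw [hjq]; omega
          rw [ih (pvFindQuote s s.length (i + 1) + 1) _ hfuel2, hd']
      · rw [if_neg hq]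
        by_cases ha : PySem.Chars.isalpha c = true
        · -- letter run
          rw [if_pos ha]
          have hwd : (s.drop (i + 1)).takeWhile (fun x => x = c) ++
              (s.drop (i + 1)).dropWhile (fun x => x = c) = s.drop (i + 1) :=
            List.takeWhile_append_dropWhile
          generalize hw : (s.drop (i + 1)).takeWhile (fun x => x = c) = w at hwd
          generalize hd : (s.drop (i + 1)).dropWhile (fun x => x = c) = d at hwd
          have hjq : pvRunEnd s s.length c (i + 1) = i + 1 + w.length := by
            rw [pvRunEnd_eq s c (i + 1), hw]
          have hsub : pvRunEnd s s.length c (i + 1) - i = w.length + 1 := by omega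
          have hdropj : s.drop (pvRunEnd s s.length c (i + 1)) = d := by
            rw [hjq, ← List.drop_drop, ← hwd, List.drop_left]
          have hwc : ∀ x ∈ w, x = c := by
            intro x hx
            rw [← hw] at hx
            simpa using List.mem_takeWhile_imp hx
          have hstep : pvStepB (t, false, []) c = (t, false, [c]) := by
            simp [pvStepB, hq, ha]
          rw [hdrop, List.foldl_cons, hstep, ← hwd, List.foldl_append,
            pvFoldB_run w t [c] c ha (by simp) (by simp) hwc, hsub, List.take_succ_cons,
            List.take_left]
          have hflush : pvFinish (d.foldl pvStepB (t, false, [c] ++ w)) =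
              pvFinish (d.foldl pvStepB (t ++ [String.ofList ([c] ++ w)], false, [])) := by
            apply pvFoldB_flush d t ([c] ++ w) (by simp)
            rcases hde : d with _ | ⟨ch, d'⟩
            · exact Or.inl rfl
            · refine Or.inr ?_
              have heq : ((s.drop (i + 1)).dropWhile (fun x => x = c)) = ch :: d' := by
                rw [hd, hde]
              have h2 : ((s.drop (i + 1)).dropWhile (fun x => x = c)).head? = some ch := by
                rw [heq]; rfl
              have h3 := List.head?_dropWhile_not (fun x => decide (x = c)) (s.drop (i + 1))
              rw [h2] at h3
              have hchc : ch ≠ c := by simpa using h3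
              simp only [List.headD_cons, List.singleton_append, List.head?_cons, Option.getD_some]
              rintro ⟨_, hcontra⟩
              exact hchc hcontra.symm
          simp only [List.singleton_append] at hflush ⊢
          have hfuel2 : s.length ≤ pvRunEnd s s.length c (i + 1) + fuel := by
            rw [hjq]; omega
          rw [hflush, ih (pvRunEnd s s.length c (i + 1)) _ hfuel2, hdropj]
        · -- single literal character
          rw [if_neg ha]
          have hstep : pvStepB (t, false, []) c = (t ++ [String.ofList [c]], false, []) := by
            simp [pvStepB, hq, ha]
          rw [hdrop, List.foldl_cons, hstep, ih (i + 1) _ (by omega)]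
    · rename_i hi
      rw [List.drop_eq_nil_of_le (by omega)]
      simp [pvFinish]

-- ===== VERDICT (by name: the statement is the Claim_ definition above) =====
theorem tokenize_babel_pattern_py_spec : Claim_equal_tokenize_babel_pattern_py := by
  intro pattern _
  unfold Spec_tokenize_babel_pattern_py tokenize_babel_pattern_py tokenize_babel_pattern_py_alt
  rw [pvLoopAF_eq_fold pattern.toList pattern.toList.length 0 [] (by omega)]
  rfl
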